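-- pv_equiv track=rewrite | github.com/jly-ml/NFAtoDFA | nfa2dfa.py | powerset3
-- ===== SOURCE A (Python) =====
-- def powerset3(A):
--     A = (list(filter(lambda a: a != 0, A)))
--     if A == []:
--         return [[]]
--     a = A[0]
--     incomplete_pset = powerset3(A[1:])
--     rest = []
--     for set in incomplete_pset:
--         rest.append([a] + set)
--     return rest + incomplete_pset
-- ===== SOURCE B (Python) =====
-- def powerset3(A):
--     xs = [a for a in A if a != 0]
--     acc = [[]]
--     for a in reversed(xs):
--         acc = [[a] + s for s in acc] + acc
--     return acc
-- ===== Notes on version B (the rewrite author's own statement) =====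
-- stated objective: alternative
-- what changed: Replaces A's recursion (with a redundant re-filter at every level) by a single filter pass followed by an iterative fold over the reversed list that doubles the accumulator, reproducing A's exact ordering.
import Mathlib
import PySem

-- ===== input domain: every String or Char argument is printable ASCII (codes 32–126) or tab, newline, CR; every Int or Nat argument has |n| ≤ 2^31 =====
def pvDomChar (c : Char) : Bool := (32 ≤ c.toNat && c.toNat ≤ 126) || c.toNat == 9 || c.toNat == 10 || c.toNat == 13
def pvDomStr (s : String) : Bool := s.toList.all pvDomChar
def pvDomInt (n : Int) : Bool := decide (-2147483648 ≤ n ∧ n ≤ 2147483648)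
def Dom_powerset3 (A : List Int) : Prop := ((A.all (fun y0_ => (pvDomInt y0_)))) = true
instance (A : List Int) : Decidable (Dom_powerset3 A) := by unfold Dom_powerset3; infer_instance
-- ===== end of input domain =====

-- B replaces A's recursion (which re-filters at every level) by one filter pass and an
-- iterative fold over the reversed list; same return values, objective: alternative.

-- ===== PORT A =====
-- A: filter zeros, recurse on the tail, prepend head to each subset of the recursion, concatenate.
def powerset3 (A : List Int) : List (List Int) :=
  match _h : A.filter (fun a => a ≠ 0) with
  | [] => [[]]
  | a :: t =>
    let incomplete := powerset3 t
    -- the Python for-loop appending [a] + set to rest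
    let rest := incomplete.foldl (fun r s => r ++ [a :: s]) []
    rest ++ incomplete
termination_by A.length
decreasing_by
  have h1 : (A.filter (fun a => a ≠ 0)).length ≤ A.length := List.length_filter_le _ _
  rw [_h] at h1; simp at h1; omega

-- ===== PORT B =====
def powerset3_alt (A : List Int) : List (List Int) :=
  let xs := A.filter (fun a => a ≠ 0)
  xs.reverse.foldl (fun acc a => acc.map (fun s => a :: s) ++ acc) [[]]

-- ===== PRECONDITION & SPEC =====
def Spec_powerset3 (A : List Int) (out : List (List Int)) : Prop := out = powerset3_alt A
instance (A : List Int) (out : List (List Int)) : Decidable (Spec_powerset3 A out) := by unfold Spec_powerset3; infer_instance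

-- ===== CLAIM (what is proved, stated in full; the proofs are below) =====
def Claim_equal_powerset3 : Prop := ∀ (A : List Int), Dom_powerset3 A → Spec_powerset3 A (powerset3 A)

-- ===== LEMMAS AND PROOFS =====

-- A equals foldr over the filtered list, by strong induction on length.
theorem pv_A_eq_foldr (A : List Int) :
    powerset3 A = (A.filter (fun a => a ≠ 0)).foldr
      (fun a acc => acc.map (fun s => a :: s) ++ acc) [[]] := by
  induction hL : A.length using Nat.strong_induction_on generalizing A with
  | _ n ih =>
    rw [powerset3]
    cases hFe : A.filter (fun a => a ≠ 0) with
    | nil => simp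
    | cons a t =>
      have ht : t.filter (fun a => a ≠ 0) = t := by
        apply List.filter_eq_self.2
        intro x hx
        have hxm : x ∈ A.filter (fun a => a ≠ 0) := by
          rw [hFe]; exact List.mem_cons_of_mem _ hx
        simpa using (List.of_mem_filter hxm)
      have hlen : t.length < n := by
        have h1 : (A.filter (fun a => a ≠ 0)).length ≤ A.length := List.length_filter_le _ _
        rw [hFe] at h1; simp at h1; omega
      have hrec := ih t.length hlen t rfl
      rw [ht] at hrec
      simp [hrec]
      induction (List.foldr (fun a acc => List.map (fun s => a :: s) acc ++ acc) ([[]] : List (List Int)) t) with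
      | nil => simp
      | cons x l ihl => simp [ihl]

-- ===== VERDICT (by name: the statement is the Claim_ definition above) =====
theorem powerset3_spec : Claim_equal_powerset3 := by
  intro A _
  unfold Spec_powerset3 powerset3_alt
  rw [pv_A_eq_foldr, List.foldl_reverse]
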